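-- pv_equiv track=rewrite | github.com/HKUDS/nanobot | nanobot/agent/tools/memory.py | _extract_excerpt
-- ===== SOURCE A (Python) =====
-- def _extract_excerpt(content: str, query_terms: set[str], max_chars: int = 400) -> str:
--     """Extract a relevant excerpt around matching terms."""
--     content_lower = content.lower()
--
--     # Find first occurrence of any query term
--     best_pos = -1
--     for term in query_terms:
--         pos = content_lower.find(term)
--         if pos != -1 and (best_pos == -1 or pos < best_pos):
--             best_pos = pos
--
--     if best_pos == -1:
--         return content[:max_chars].strip() + ("..." if len(content) > max_chars else "")
--
--     # Extract context around the match
--     start = max(0, best_pos - 100)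
--     end = min(len(content), best_pos + max_chars - 100)
--     excerpt = content[start:end].strip()
--
--     if start > 0:
--         excerpt = "..." + excerpt
--     if end < len(content):
--         excerpt = excerpt + "..."
--
--     return excerpt
-- ===== SOURCE B (Python) =====
-- def _extract_excerpt(content: str, query_terms: set[str], max_chars: int = 400) -> str:
--     """Extract a relevant excerpt around matching terms (single left-to-right scan)."""
--     content_lower = content.lower()
--     n = len(content)
--
--     # Earliest position where ANY term matches, found in ONE pass over the text
--     # (instead of one full .find() scan per term).  A first-character set
--     # rejects most positions with a single membership test.
--     best = None
--     if "" in query_terms: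
--         best = 0
--     else:
--         firsts = {t[0] for t in query_terms}
--         for i, ch in enumerate(content_lower):
--             if ch in firsts and any(content_lower.startswith(t, i) for t in query_terms):
--                 best = i
--                 break
--
--     if best is None:
--         return content[:max_chars].strip() + ("..." if n > max_chars else "")
--
--     start = max(0, best - 100)
--     end = min(n, best + max_chars - 100)
--     prefix = "..." if start > 0 else ""
--     suffix = "..." if end < n else ""
--     return prefix + content[start:end].strip() + suffix
-- ===== Notes on version B (the rewrite author's own statement) =====
-- stated objective: faster
-- what changed: A runs one full .find() scan over the whole text per query term and keeps the minimum position; B makes a single left-to-right pass that filters positions with a precomputed first-character set and stops at the earliest match of any term.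
import Mathlib
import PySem

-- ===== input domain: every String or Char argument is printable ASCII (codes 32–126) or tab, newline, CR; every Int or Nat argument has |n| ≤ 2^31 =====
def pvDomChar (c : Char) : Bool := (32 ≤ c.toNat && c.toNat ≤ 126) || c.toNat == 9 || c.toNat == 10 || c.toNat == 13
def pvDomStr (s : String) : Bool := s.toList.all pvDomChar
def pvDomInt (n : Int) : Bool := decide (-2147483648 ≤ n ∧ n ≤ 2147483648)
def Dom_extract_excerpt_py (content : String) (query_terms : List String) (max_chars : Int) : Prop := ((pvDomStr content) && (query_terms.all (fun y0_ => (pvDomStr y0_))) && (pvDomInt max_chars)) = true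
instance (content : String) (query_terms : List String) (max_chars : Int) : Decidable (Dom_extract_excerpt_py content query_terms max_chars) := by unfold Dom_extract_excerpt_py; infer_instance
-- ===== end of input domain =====

-- B replaces A's one-full-`find`-scan-per-term search by a single left-to-right pass
-- (first-character set as filter) that stops at the earliest match (objective: faster; measured).

-- ===== PORT A =====
def extract_excerpt_py (content : String) (query_terms : List String) (max_chars : Int) : String :=
  let content_lower := PySem.Chars.lower content.toList
  let best_pos : Int := query_terms.foldl (fun best term =>
      let pos := PySem.Chars.find content_lower term.toList
      if pos ≠ -1 ∧ (best = -1 ∨ pos < best) then pos else best) (-1)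
  if best_pos = -1 then
    String.mk (PySem.Chars.strip (PySem.Chars.slice content.toList none (some max_chars)) ++
      (if (content.toList.length : Int) > max_chars then "...".toList else []))
  else
    let start := max 0 (best_pos - 100)
    let end_ := min ((content.toList.length : Int)) (best_pos + max_chars - 100)
    let excerpt := PySem.Chars.strip (PySem.Chars.slice content.toList (some start) (some end_))
    let excerpt := if start > 0 then "...".toList ++ excerpt else excerpt
    let excerpt := if end_ < (content.toList.length : Int) then excerpt ++ "...".toList else excerpt
    String.mk excerpt

-- ===== PORT B =====
-- the single scan: at each position one first-character membership test, then the prefix tests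
def pvScanB (query_terms : List String) (firsts : PySem.Set Char) : Nat → List Char → Option Nat
  | _, [] => none
  | i, c :: rest =>
      if PySem.Set.contains firsts c ∧ query_terms.any (fun t => t.toList.isPrefixOf (c :: rest)) then
        some i
      else pvScanB query_terms firsts (i + 1) rest

def extract_excerpt_py_alt (content : String) (query_terms : List String) (max_chars : Int) : String :=
  let cl := PySem.Chars.lower content.toList
  let n : Int := content.toList.length
  let best? : Option Nat :=
    if query_terms.contains "" then some 0
    else
      let firsts : PySem.Set Char := query_terms.foldl (fun s t =>
        match t.toList with
        | [] => s
        | c :: _ => PySem.Set.add s c) PySem.Set.empty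
      pvScanB query_terms firsts 0 cl
  match best? with
  | none =>
      String.mk (PySem.Chars.strip (PySem.Chars.slice content.toList none (some max_chars)) ++
        (if n > max_chars then "...".toList else []))
  | some b =>
      let start : Int := max 0 ((b : Int) - 100)
      let stop : Int := min n ((b : Int) + max_chars - 100)
      let pre := if 0 < start then "...".toList else []
      let suf := if stop < n then "...".toList else []
      String.mk (pre ++ PySem.Chars.strip (PySem.Chars.slice content.toList (some start) (some stop)) ++ suf)

-- ===== PRECONDITION & SPEC =====
def Spec_extract_excerpt_py (content : String) (query_terms : List String) (max_chars : Int) (out : String) : Prop := out = extract_excerpt_py_alt content query_terms max_chars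
instance (content : String) (query_terms : List String) (max_chars : Int) (out : String) : Decidable (Spec_extract_excerpt_py content query_terms max_chars out) := by unfold Spec_extract_excerpt_py; infer_instance

-- ===== CLAIM (what is proved, stated in full; the proofs are below) =====
def Claim_equal_extract_excerpt_py : Prop := ∀ (content : String) (query_terms : List String) (max_chars : Int), Dom_extract_excerpt_py content query_terms max_chars → Spec_extract_excerpt_py content query_terms max_chars (extract_excerpt_py content query_terms max_chars)

-- ===== LEMMAS AND PROOFS =====

-- "some query term matches (as a prefix) at position j of cl"
def pvP (cl : List Char) (qs : List String) (j : Nat) : Prop := ∃ t ∈ qs, t.toList <+: cl.drop j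

theorem pvFoldA_aux (cl : List Char) (qs : List String) :
    ∀ (A₀ : Nat → Prop) (acc : Int),
    ((acc = -1 ∧ ∀ j, ¬ A₀ j) ∨ (0 ≤ acc ∧ A₀ acc.toNat ∧ ∀ j < acc.toNat, ¬ A₀ j)) →
    (let r := qs.foldl (fun best term =>
        let pos := PySem.Chars.find cl term.toList
        if pos ≠ -1 ∧ (best = -1 ∨ pos < best) then pos else best) acc
     (r = -1 ∧ ∀ j, ¬ (A₀ j ∨ pvP cl qs j)) ∨
     (0 ≤ r ∧ (A₀ r.toNat ∨ pvP cl qs r.toNat) ∧ ∀ j < r.toNat, ¬ (A₀ j ∨ pvP cl qs j))) := by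
  induction qs with
  | nil =>
      intro A₀ acc hacc
      simp only [List.foldl_nil]
      rcases hacc with ⟨h1, h2⟩ | ⟨h1, h2, h3⟩
      · left; refine ⟨h1, fun j hj => ?_⟩
        rcases hj with hj | ⟨t, ht, _⟩
        · exact h2 j hj
        · exact absurd ht (List.not_mem_nil)
      · right; refine ⟨h1, Or.inl h2, fun j hj hh => ?_⟩
        rcases hh with hh | ⟨t, ht, _⟩
        · exact h3 j hj hh
        · exact absurd ht (List.not_mem_nil)
  | cons t qs ih =>
      intro A₀ acc hacc
      simp only [List.foldl_cons]
      set pos := PySem.Chars.find cl t.toList with hpos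
      have hstep : ((if pos ≠ -1 ∧ (acc = -1 ∨ pos < acc) then pos else acc) = -1 ∧
            ∀ j, ¬ ((fun j => A₀ j ∨ t.toList <+: cl.drop j) j)) ∨
            (0 ≤ (if pos ≠ -1 ∧ (acc = -1 ∨ pos < acc) then pos else acc) ∧
             (fun j => A₀ j ∨ t.toList <+: cl.drop j) (if pos ≠ -1 ∧ (acc = -1 ∨ pos < acc) then pos else acc).toNat ∧
             ∀ j < (if pos ≠ -1 ∧ (acc = -1 ∨ pos < acc) then pos else acc).toNat,
               ¬ ((fun j => A₀ j ∨ t.toList <+: cl.drop j) j)) := by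
        by_cases hp : pos = -1
        · -- t never matches
          have hnom : ∀ j, ¬ t.toList <+: cl.drop j := by
            intro j hj
            have hne : pos ≠ -1 := by
              rw [hpos, PySem.Chars.find_ne_neg_one_iff, ← PySem.Chars.isIn_iff_infix]
              exact (PySem.Chars.exists_prefix_drop_iff_isIn (s := cl) (sub := t.toList)).1 ⟨j, hj⟩
            exact hne hp
          have hif : (if pos ≠ -1 ∧ (acc = -1 ∨ pos < acc) then pos else acc) = acc := by
            simp [hp]
          rw [hif]
          rcases hacc with ⟨h1, h2⟩ | ⟨h1, h2, h3⟩
          · left; exact ⟨h1, fun j hj => hj.elim (h2 j) (hnom j)⟩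
          · right; exact ⟨h1, Or.inl h2, fun j hj hh => hh.elim (h3 j hj) (hnom j)⟩
        · -- t matches, pos ≥ 0 is its least match
          have h0 : 0 ≤ pos := by have := PySem.Chars.neg_one_le_find (s := cl) (sub := t.toList); omega
          have hsp := PySem.Chars.find_spec (s := cl) (sub := t.toList) h0
          rcases hacc with ⟨h1, h2⟩ | ⟨h1, h2, h3⟩
          · have hif : (if pos ≠ -1 ∧ (acc = -1 ∨ pos < acc) then pos else acc) = pos := by
              simp [hp, h1]
            rw [hif]
            right
            exact ⟨h0, Or.inr hsp.1, fun j hj hh => hh.elim (h2 j) (fun hm => hsp.2 j hj hm)⟩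
          · by_cases hlt : pos < acc
            · have hif : (if pos ≠ -1 ∧ (acc = -1 ∨ pos < acc) then pos else acc) = pos := by
                simp [hp, hlt]
              rw [hif]
              right
              refine ⟨h0, Or.inr hsp.1, fun j hj hh => ?_⟩
              rcases hh with hh | hm
              · exact h3 j (by omega) hh
              · exact hsp.2 j hj hm
            · have hif : (if pos ≠ -1 ∧ (acc = -1 ∨ pos < acc) then pos else acc) = acc := by
                have : acc ≠ -1 := by omega
                simp [hp, hlt, this]
              rw [hif]
              right
              refine ⟨h1, Or.inl h2, fun j hj hh => ?_⟩
              rcases hh with hh | hm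
              · exact h3 j hj hh
              · exact hsp.2 j (by omega) hm
      have := ih (fun j => A₀ j ∨ t.toList <+: cl.drop j)
        (if pos ≠ -1 ∧ (acc = -1 ∨ pos < acc) then pos else acc) hstep
      simp only at this
      -- massage pvP (t :: qs) into A₀ ∨ t-match ∨ pvP qs
      have hPiff : ∀ j, pvP cl (t :: qs) j ↔ (t.toList <+: cl.drop j ∨ pvP cl qs j) := by
        intro j
        constructor
        · rintro ⟨u, hu, hm⟩
          rcases List.mem_cons.1 hu with rfl | hu
          · exact Or.inl hm
          · exact Or.inr ⟨u, hu, hm⟩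
        · rintro (hm | ⟨u, hu, hm⟩)
          · exact ⟨t, List.mem_cons_self, hm⟩
          · exact ⟨u, List.mem_cons.2 (Or.inr hu), hm⟩
      rcases this with ⟨h1, h2⟩ | ⟨h1, h2, h3⟩
      · left
        refine ⟨h1, fun j hj => h2 j ?_⟩
        rcases hj with hj | hj
        · exact Or.inl (Or.inl hj)
        · rcases (hPiff j).1 hj with hm | hm
          · exact Or.inl (Or.inr hm)
          · exact Or.inr hm
      · right
        refine ⟨h1, ?_, fun j hj hh => h3 j hj ?_⟩
        · rcases h2 with (hh | hm) | hm
          · exact Or.inl hh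
          · exact Or.inr ((hPiff _).2 (Or.inl hm))
          · exact Or.inr ((hPiff _).2 (Or.inr hm))
        · rcases hh with hh | hj'
          · exact Or.inl (Or.inl hh)
          · rcases (hPiff j).1 hj' with hm | hm
            · exact Or.inl (Or.inr hm)
            · exact Or.inr hm

theorem pvFirsts_complete (qs : List String) (t : String) (ht : t ∈ qs) (c : Char) (r : List Char)
    (hc : t.toList = c :: r) :
    PySem.Set.contains (qs.foldl (fun s t =>
      match t.toList with
      | [] => s
      | c :: _ => PySem.Set.add s c) PySem.Set.empty) c = true := by
  suffices h : ∀ (s0 : PySem.Set Char),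
      (c ∈ s0 ∨ ∃ u ∈ qs, ∃ r', u.toList = c :: r') →
      c ∈ qs.foldl (fun s t =>
        match t.toList with
        | [] => s
        | c :: _ => PySem.Set.add s c) s0 by
    have hmem := h PySem.Set.empty (Or.inr ⟨t, ht, r, hc⟩)
    simpa [PySem.Set.contains] using hmem
  clear ht hc
  induction qs with
  | nil =>
      rintro s0 (h | ⟨u, hu, _⟩)
      · simpa using h
      · exact absurd hu (List.not_mem_nil)
  | cons u qs ih =>
      rintro s0 h
      simp only [List.foldl_cons]
      rcases h with h | ⟨v, hv, r', hvr⟩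
      · apply ih; left
        cases hu : u.toList with
        | nil => simpa [hu] using h
        | cons c' _ => exact (PySem.Set.mem_add _ _ _).2 (Or.inl h)
      · rcases List.mem_cons.1 hv with rfl | hv
        · apply ih; left
          simp only [hvr]
          exact (PySem.Set.mem_add _ _ _).2 (Or.inr rfl)
        · apply ih; right; exact ⟨v, hv, r', hvr⟩

theorem pvScanB_char (qs : List String) (firsts : PySem.Set Char)
    (hne : ∀ t ∈ qs, t.toList ≠ [])
    (hf : ∀ t ∈ qs, ∀ c r, t.toList = c :: r → PySem.Set.contains firsts c = true) :
    ∀ (l : List Char) (i : Nat),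
    (match pvScanB qs firsts i l with
     | none => ∀ j, ¬ (∃ t ∈ qs, t.toList <+: l.drop j)
     | some b => i ≤ b ∧ (∃ t ∈ qs, t.toList <+: l.drop (b - i)) ∧
         ∀ j < b - i, ¬ (∃ t ∈ qs, t.toList <+: l.drop j)) := by
  intro l
  induction l with
  | nil =>
      intro i
      simp only [pvScanB]
      rintro j ⟨t, ht, hm⟩
      rw [List.drop_nil] at hm
      exact hne t ht (List.prefix_nil.1 hm)
  | cons c rest ih =>
      intro i
      have hguard : (PySem.Set.contains firsts c ∧ qs.any (fun t => t.toList.isPrefixOf (c :: rest))) ↔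
          (∃ t ∈ qs, t.toList <+: (c :: rest)) := by
        constructor
        · rintro ⟨-, hany⟩
          rcases List.any_eq_true.1 hany with ⟨t, ht, hp⟩
          exact ⟨t, ht, List.isPrefixOf_iff_prefix.1 hp⟩
        · rintro ⟨t, ht, hp⟩
          have htl : t.toList ≠ [] := hne t ht
          obtain ⟨c', r', hc'⟩ : ∃ c' r', t.toList = c' :: r' := by
            cases h : t.toList with
            | nil => exact absurd h htl
            | cons a b => exact ⟨a, b, rfl⟩
          have hc'' : c' = c := by
            rw [hc'] at hp
            exact (List.cons_prefix_cons.1 hp).1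
          refine ⟨by rw [← hc'']; exact hf t ht c' r' hc', ?_⟩
          exact List.any_eq_true.2 ⟨t, ht, List.isPrefixOf_iff_prefix.2 hp⟩
      by_cases hg : (PySem.Set.contains firsts c ∧ qs.any (fun t => t.toList.isPrefixOf (c :: rest)))
      · simp only [pvScanB, if_pos hg]
        refine ⟨le_refl i, ?_, ?_⟩
        · simpa using hguard.1 hg
        · intro j hj; omega
      · simp only [pvScanB, if_neg hg]
        have := ih (i + 1)
        cases hs : pvScanB qs firsts (i + 1) rest with
        | none =>
            rw [hs] at this
            intro j hj
            cases j with
            | zero => exact hg (hguard.2 (by simpa using hj))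
            | succ j' => exact this j' (by simpa using hj)
        | some b =>
            rw [hs] at this
            obtain ⟨hib, hmatch, hmin⟩ := this
            refine ⟨by omega, ?_, ?_⟩
            · have : b - i = (b - (i + 1)) + 1 := by omega
              rw [this]
              simpa using hmatch
            · intro j hj
              cases j with
              | zero => intro hj'; exact hg (hguard.2 (by simpa using hj'))
              | succ j' =>
                  intro hj'
                  exact hmin j' (by omega) (by simpa using hj')


-- A's fold result: -1 when no term occurs, else the least position where some term matches
theorem pvFoldA_char (cl : List Char) (qs : List String) :
    (let r := qs.foldl (fun best term =>
        let pos := PySem.Chars.find cl term.toList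
        if pos ≠ -1 ∧ (best = -1 ∨ pos < best) then pos else best) (-1 : Int)
     (r = -1 ∧ ∀ j, ¬ pvP cl qs j) ∨
     (0 ≤ r ∧ pvP cl qs r.toNat ∧ ∀ j < r.toNat, ¬ pvP cl qs j)) := by
  have := pvFoldA_aux cl qs (fun _ => False) (-1)
    (Or.inl ⟨rfl, fun _ h => h⟩)
  simp only [false_or] at this
  exact this

-- A's fold and B's search locate the same earliest match (Int sentinel vs Option)
theorem pvBest_agree (content : String) (qs : List String) :
    ((List.foldl (fun best term => if PySem.Chars.find (PySem.Chars.lower content.toList) term.toList ≠ -1 ∧ (best = -1 ∨ PySem.Chars.find (PySem.Chars.lower content.toList) term.toList < best) then PySem.Chars.find (PySem.Chars.lower content.toList) term.toList else best) (-1 : Int) qs) = -1 ∧ ((if qs.contains "" = true then some 0 else pvScanB qs (List.foldl (fun s t => match t.toList with | [] => s | c :: _ => PySem.Set.add s c) PySem.Set.empty qs) 0 (PySem.Chars.lower content.toList))) = none) ∨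
    (∃ b : Nat, (List.foldl (fun best term => if PySem.Chars.find (PySem.Chars.lower content.toList) term.toList ≠ -1 ∧ (best = -1 ∨ PySem.Chars.find (PySem.Chars.lower content.toList) term.toList < best) then PySem.Chars.find (PySem.Chars.lower content.toList) term.toList else best) (-1 : Int) qs) = (b : Int) ∧ ((if qs.contains "" = true then some 0 else pvScanB qs (List.foldl (fun s t => match t.toList with | [] => s | c :: _ => PySem.Set.add s c) PySem.Set.empty qs) 0 (PySem.Chars.lower content.toList))) = some b) := by
  have hchar := pvFoldA_char (PySem.Chars.lower content.toList) qs
  simp only [] at hchar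
  by_cases hq : qs.contains "" = true
  · have hmem : "" ∈ qs := by simpa using hq
    have hP0 : pvP (PySem.Chars.lower content.toList) qs 0 := ⟨"", hmem, by simp⟩
    rcases hchar with ⟨h1, h2⟩ | ⟨h1, h2, h3⟩
    · exact absurd hP0 (h2 0)
    · right
      refine ⟨0, ?_, by rw [if_pos hq]⟩
      have hnot : ¬ 0 < (List.foldl (fun best term => if PySem.Chars.find (PySem.Chars.lower content.toList) term.toList ≠ -1 ∧ (best = -1 ∨ PySem.Chars.find (PySem.Chars.lower content.toList) term.toList < best) then PySem.Chars.find (PySem.Chars.lower content.toList) term.toList else best) (-1 : Int) qs).toNat := fun h => h3 0 h hP0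
      omega
  · have hnm : "" ∉ qs := by simpa using hq
    have hne : ∀ t ∈ qs, t.toList ≠ [] := by
      intro t ht htl
      have hts : t = "" := String.toList_eq_nil_iff.mp htl
      exact hnm (hts ▸ ht)
    have hf : ∀ t ∈ qs, ∀ c rr, t.toList = c :: rr →
        PySem.Set.contains (List.foldl (fun s t => match t.toList with | [] => s | c :: _ => PySem.Set.add s c) PySem.Set.empty qs) c = true :=
      fun t ht c rr hc => pvFirsts_complete qs t ht c rr hc
    have hscan := pvScanB_char qs _ hne hf (PySem.Chars.lower content.toList) 0
    cases hs : pvScanB qs (List.foldl (fun s t => match t.toList with | [] => s | c :: _ => PySem.Set.add s c) PySem.Set.empty qs) 0 (PySem.Chars.lower content.toList) with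
    | none =>
        rw [hs] at hscan
        rcases hchar with ⟨h1, _⟩ | ⟨h1, h2, _⟩
        · left; exact ⟨h1, by rw [if_neg hq]⟩
        · exact absurd h2 (hscan _)
    | some b =>
        rw [hs] at hscan
        obtain ⟨-, hmatch, hmin⟩ := hscan
        simp only [Nat.sub_zero] at hmatch hmin
        rcases hchar with ⟨h1, h2⟩ | ⟨h1, h2, h3⟩
        · exact absurd hmatch (h2 b)
        · right
          refine ⟨b, ?_, by rw [if_neg hq]⟩
          have hbr : ¬ (List.foldl (fun best term => if PySem.Chars.find (PySem.Chars.lower content.toList) term.toList ≠ -1 ∧ (best = -1 ∨ PySem.Chars.find (PySem.Chars.lower content.toList) term.toList < best) then PySem.Chars.find (PySem.Chars.lower content.toList) term.toList else best) (-1 : Int) qs).toNat < b := fun h => hmin _ h h2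
          have hrb : ¬ b < (List.foldl (fun best term => if PySem.Chars.find (PySem.Chars.lower content.toList) term.toList ≠ -1 ∧ (best = -1 ∨ PySem.Chars.find (PySem.Chars.lower content.toList) term.toList < best) then PySem.Chars.find (PySem.Chars.lower content.toList) term.toList else best) (-1 : Int) qs).toNat := fun h => h3 b h hmatch
          omega

-- ===== VERDICT (by name: the statement is the Claim_ definition above) =====
theorem extract_excerpt_py_spec : Claim_equal_extract_excerpt_py := by
  intro content qs mc _
  unfold Spec_extract_excerpt_py
  simp only [extract_excerpt_py, extract_excerpt_py_alt]
  rcases pvBest_agree content qs with ⟨h1, h2⟩ | ⟨b, h1, h2⟩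
  · rw [h1, h2]
    simp
  · rw [h1, h2]
    have hne : ((b : Int)) ≠ -1 := by omega
    rw [if_neg hne]
    simp only []
    split_ifs <;> simp
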